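-- pv_equiv track=rewrite | github.com/aadittmar/advent-of-code | src/2025/day_2/gift_shop.py | get_all_possibles_sequences_for_product_id
-- ===== SOURCE A (Python) =====
-- from typing import List
--
-- def get_all_possibles_sequences_for_product_id(product_id: int) -> List[str]:
--     sequences: List[str] = []
--
--     for character in str(product_id):
--         if len(sequences) == 0:
--             sequences.append(character)
--         else:
--             sequences.append(sequences[-1] + character)
--
--     return sequences
-- ===== SOURCE B (Python) =====
-- def get_all_possibles_sequences_for_product_id(product_id):
--     s = str(product_id)
--     return [s[:i] for i in range(1, len(s) + 1)]
-- ===== Notes on version B (the rewrite author's own statement) =====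
-- stated objective: simpler
-- what changed: Replaces the stateful loop that extends the previous element (with a len==0 first-element branch) by a single comprehension slicing the digit string independently at each length.
import Mathlib
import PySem

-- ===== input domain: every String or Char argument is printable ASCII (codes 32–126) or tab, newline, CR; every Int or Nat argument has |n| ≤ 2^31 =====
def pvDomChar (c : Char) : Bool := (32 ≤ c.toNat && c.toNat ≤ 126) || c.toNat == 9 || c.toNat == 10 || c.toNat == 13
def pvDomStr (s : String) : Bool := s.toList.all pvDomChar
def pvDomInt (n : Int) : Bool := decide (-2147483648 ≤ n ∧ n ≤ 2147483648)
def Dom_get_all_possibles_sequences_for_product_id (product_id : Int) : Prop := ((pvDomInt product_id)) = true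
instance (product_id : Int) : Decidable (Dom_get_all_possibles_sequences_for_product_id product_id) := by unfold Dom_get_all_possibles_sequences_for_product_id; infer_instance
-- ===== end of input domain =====

-- B replaces A's accumulator loop (extend previous element, first-element branch) by
-- independent prefix slices of str(product_id); objective: simpler.

-- ===== PORT A =====
def get_all_possibles_sequences_for_product_id (product_id : Int) : List String :=
  (PySem.Int.toStr product_id).toList.foldl
    (fun sequences character =>
      if sequences.length = 0 then
        sequences ++ [String.ofList [character]]
      else
        sequences ++ [((PySem.List.pyGet? sequences (-1)).getD "") ++ String.ofList [character]])
    []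

-- ===== PORT B =====
def get_all_possibles_sequences_for_product_id_alt (product_id : Int) : List String :=
  let s := PySem.Int.toStr product_id
  (PySem.List.pyRange 1 (PySem.Str.len s + 1) 1).map
    (fun i => PySem.Str.slice s none (some i))

-- ===== PRECONDITION & SPEC =====
def Spec_get_all_possibles_sequences_for_product_id (product_id : Int) (out : List String) : Prop := out = get_all_possibles_sequences_for_product_id_alt product_id
instance (product_id : Int) (out : List String) : Decidable (Spec_get_all_possibles_sequences_for_product_id product_id out) := by unfold Spec_get_all_possibles_sequences_for_product_id; infer_instance

-- ===== CLAIM (what is proved, stated in full; the proofs are below) =====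
def Claim_equal_get_all_possibles_sequences_for_product_id : Prop := ∀ (product_id : Int), Dom_get_all_possibles_sequences_for_product_id product_id → Spec_get_all_possibles_sequences_for_product_id product_id (get_all_possibles_sequences_for_product_id product_id)

-- ===== LEMMAS AND PROOFS =====

-- A's loop over any character list produces the prefixes of lengths 1..len.
theorem pvLoopA_eq (l : List Char) :
    l.foldl
      (fun sequences character =>
        if sequences.length = 0 then
          sequences ++ [String.ofList [character]]
        else
          sequences ++ [((PySem.List.pyGet? sequences (-1)).getD "") ++ String.ofList [character]])
      []
    = (List.range l.length).map (fun k => String.ofList (l.take (k + 1))) := by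
  induction l using List.reverseRecOn with
  | nil => simp
  | append_singleton l c ih =>
    rw [List.foldl_append, ih]
    cases l with
    | nil => simp
    | cons x xs =>
      have hne : (List.range (x :: xs).length).map
          (fun k => String.ofList ((x :: xs).take (k + 1))) ≠ [] := by simp
      rw [List.foldl_cons, List.foldl_nil]
      rw [if_neg (by simp)]
      rw [PySem.List.pyGet?_neg_one]
      have hlast : ((List.range (x :: xs).length).map
          (fun k => String.ofList ((x :: xs).take (k + 1)))).getLast? = some (String.ofList (x :: xs)) := by
        rw [List.getLast?_eq_getElem?]
        simp
      rw [hlast]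
      simp only [Option.getD_some]
      have hlen : ((x :: xs) ++ [c]).length = (x :: xs).length + 1 := by simp
      rw [hlen, List.range_succ, List.map_append, List.map_singleton]
      congr 1
      · apply List.map_congr_left
        intro k hk
        simp only [List.mem_range] at hk
        rw [List.take_append_of_le_length (by simpa using hk)]
      · rw [List.take_of_length_le (by simp), ← String.ofList_append]

theorem get_all_possibles_sequences_for_product_id_eq (product_id : Int) :
    get_all_possibles_sequences_for_product_id product_id
      = get_all_possibles_sequences_for_product_id_alt product_id := by
  unfold get_all_possibles_sequences_for_product_id get_all_possibles_sequences_for_product_id_alt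
  rw [pvLoopA_eq]
  dsimp only
  rw [PySem.List.pyRange_one]
  have h1 : (PySem.Str.len (PySem.Int.toStr product_id) + 1 - 1 : Int).toNat
      = (PySem.Int.toStr product_id).toList.length := by
    simp [PySem.Str.len_eq]
  rw [h1, List.map_map]
  apply List.map_congr_left
  intro k hk
  simp only [List.mem_range] at hk
  simp only [Function.comp]
  have : (1 + (k : Int)) = ((k + 1 : Nat) : Int) := by push_cast; ring
  rw [this, PySem.Str.slice]
  rw [show PySem.Chars.slice (PySem.Int.toStr product_id).toList none (some ((k+1:Nat):Int))
        = (PySem.Int.toStr product_id).toList.take (k+1) from PySem.List.slice_to_natCast ..]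

-- ===== VERDICT (by name: the statement is the Claim_ definition above) =====
theorem get_all_possibles_sequences_for_product_id_spec : Claim_equal_get_all_possibles_sequences_for_product_id := by
  intro pid _
  unfold Spec_get_all_possibles_sequences_for_product_id
  exact get_all_possibles_sequences_for_product_id_eq pid
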